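-- pv_equiv track=rewrite | github.com/overpitch/fire-risk-dashboard | file_processor.py | find_email_column
-- ===== SOURCE A (Python) =====
-- from typing import Dict, List, Tuple, Optional
--
-- def find_email_column(headers: List[str]) -> Optional[int]:
--     """
--     Find the column index that likely contains email addresses.
--     Looks for headers containing 'email' (case insensitive).
--
--     Args:
--         headers: List of column header strings
--
--     Returns:
--         Index of the email column or None if not found
--     """
--     # First check for exact matches to common email header names
--     common_headers = ['email', 'e-mail', 'email address', 'e-mail address']
--     for i, header in enumerate(headers):
--         header_lower = header.lower()
--         if header_lower in common_headers:
--             return i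
--
--     # Look for columns where the header contains 'email'
--     # Only if it looks like a header and not an actual email address
--     for i, header in enumerate(headers):
--         header_lower = header.lower()
--         if 'email' in header_lower and '@' not in header_lower:
--             return i
--
--     return None
-- ===== SOURCE B (Python) =====
-- def find_email_column(headers):
--     """Right-to-left scan carrying (exact, sub) accumulators; leftmost
--     matches survive because later (smaller-index) writes overwrite."""
--     exact = sub = None
--     for i, h in reversed(list(enumerate(headers))):
--         hl = h.lower()
--         if hl in ('email', 'e-mail', 'email address', 'e-mail address'):
--             exact = i
--         elif 'email' in hl and '@' not in hl:
--             sub = i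
--     return exact if exact is not None else sub
-- ===== Notes on version B (the rewrite author's own statement) =====
-- stated objective: alternative
-- what changed: Replaces A's two early-return forward passes with one backward fold over the enumerated headers that carries a pair of accumulators (first exact index, first non-exact substring index), combined only after the scan.
import Mathlib
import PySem

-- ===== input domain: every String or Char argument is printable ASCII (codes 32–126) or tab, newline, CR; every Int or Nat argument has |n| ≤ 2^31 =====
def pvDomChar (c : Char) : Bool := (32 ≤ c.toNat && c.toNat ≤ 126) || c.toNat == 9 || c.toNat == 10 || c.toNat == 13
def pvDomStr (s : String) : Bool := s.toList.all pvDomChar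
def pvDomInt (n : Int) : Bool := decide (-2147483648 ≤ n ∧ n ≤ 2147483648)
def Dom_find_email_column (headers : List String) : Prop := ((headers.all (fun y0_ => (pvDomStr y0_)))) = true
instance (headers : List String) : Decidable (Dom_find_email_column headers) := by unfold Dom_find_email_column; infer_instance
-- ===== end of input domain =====

-- B replaces A's two early-return forward passes by one backward fold over the
-- enumerated headers carrying a pair of accumulators (objective: alternative).


-- ===== PORT A =====
def aCommonHeaders : List String := ["email", "e-mail", "email address", "e-mail address"]

-- first loop: exact match against common_headers, early return
def aLoop1 : List String → Int → Option Int
  | [], _ => none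
  | h :: t, i =>
    let hl := PySem.Str.lower h
    if aCommonHeaders.contains hl then some i else aLoop1 t (i + 1)

-- second loop: 'email' in header and '@' not in header, early return
def aLoop2 : List String → Int → Option Int
  | [], _ => none
  | h :: t, i =>
    let hl := PySem.Str.lower h
    if PySem.Str.isIn "email" hl && !(PySem.Str.isIn "@" hl) then some i else aLoop2 t (i + 1)

def find_email_column (headers : List String) : Option Int :=
  match aLoop1 headers 0 with
  | some i => some i
  | none => aLoop2 headers 0

-- ===== PORT B =====
-- one step of the backward scan: overwrite the matching accumulator
def bStep (p : Int × String) (acc : Option Int × Option Int) : Option Int × Option Int :=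
  let hl := PySem.Str.lower p.2
  if hl ∈ (["email", "e-mail", "email address", "e-mail address"] : List String) then
    (some p.1, acc.2)
  else if PySem.Str.isIn "email" hl && !(PySem.Str.isIn "@" hl) then
    (acc.1, some p.1)
  else acc

-- reversed(list(enumerate(headers))) loop updating (exact, sub) = a right fold
def find_email_column_alt (headers : List String) : Option Int :=
  let r := (PySem.List.enumerate headers).foldr bStep (none, none)
  match r.1 with
  | some i => some i
  | none => r.2

-- ===== PRECONDITION & SPEC =====
def Spec_find_email_column (headers : List String) (out : Option Int) : Prop := out = find_email_column_alt headers
instance (headers : List String) (out : Option Int) : Decidable (Spec_find_email_column headers out) := by unfold Spec_find_email_column; infer_instance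

-- ===== CLAIM (what is proved, stated in full; the proofs are below) =====
def Claim_equal_find_email_column : Prop := ∀ (headers : List String), Dom_find_email_column headers → Spec_find_email_column headers (find_email_column headers)

-- ===== LEMMAS AND PROOFS =====
-- invariant of the backward scan: its first component is A's first loop and,
-- when that is none, its second component is A's second loop
lemma fold_inv (hs : List String) : ∀ (i : Int),
    ((PySem.List.enumerate hs i).foldr bStep (none, none)).1 = aLoop1 hs i ∧
    (aLoop1 hs i = none →
      ((PySem.List.enumerate hs i).foldr bStep (none, none)).2 = aLoop2 hs i) := by
  induction hs with
  | nil => intro i; simp [PySem.List.enumerate_nil, aLoop1, aLoop2]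
  | cons h t ih =>
    intro i
    obtain ⟨ih1, ih2⟩ := ih (i + 1)
    simp only [PySem.List.enumerate_cons, List.foldr_cons, bStep, aLoop1, aLoop2]
    by_cases hm : PySem.Str.lower h ∈
        (["email", "e-mail", "email address", "e-mail address"] : List String)
    · have hc : aCommonHeaders.contains (PySem.Str.lower h) = true := by
        simpa [aCommonHeaders] using hm
      rw [if_pos hm, if_pos hc]
      exact ⟨rfl, by simp⟩
    · have hc : ¬ aCommonHeaders.contains (PySem.Str.lower h) = true := by
        simpa [aCommonHeaders] using hm
      rw [if_neg hm, if_neg hc]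
      by_cases hsub :
          (PySem.Str.isIn "email" (PySem.Str.lower h)
            && !(PySem.Str.isIn "@" (PySem.Str.lower h))) = true
      · rw [if_pos hsub, if_pos hsub]
        exact ⟨ih1, fun _ => rfl⟩
      · rw [if_neg hsub, if_neg hsub]
        exact ⟨ih1, ih2⟩

-- ===== VERDICT (by name: the statement is the Claim_ definition above) =====
theorem find_email_column_spec : Claim_equal_find_email_column := by
  intro headers _
  unfold Spec_find_email_column find_email_column find_email_column_alt
  obtain ⟨h1, h2⟩ := fold_inv headers 0
  cases ha : aLoop1 headers 0 with
  | some j => simp [h1, ha]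
  | none => simp [h1, ha, h2 ha]
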